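-- pv_equiv track=rewrite | github.com/RDMaven/NSI-TERM | PROLOGIN/Ex2_maxi.py | mise_en_boite
-- ===== SOURCE A (Python) =====
-- def mise_en_boite(n: int, restes: list[int], boites: list[int]) -> None:
--     """ Affiche sur une ligne le nombre maximum de restes que l'on peut mettre en boîte.
--
--     Args:
--         n (int): Le nombre de boîtes et de restes
--         restes (list[int]): Liste des volumes des restes
--         boites (list[int]): Liste des volumes des boîtes
--
--     Returns:
--         _type_: _description_
--     """
--
--     while restes:
--         r = max(restes)
--         b = max(boites)
--         if r > b :
--             n -= 1
--         else:
--             boites.remove(b)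
--         restes.remove(r)
--
--     return n # = n- len(boites)
-- ===== SOURCE B (Python) =====
-- def mise_en_boite(n: int, restes: list[int], boites: list[int]) -> int:
--     # Sort both lists descending once, then a single two-pointer scan:
--     # each reste (largest first) either fits in the largest remaining boite
--     # (advance the boite pointer) or is counted out.  Does not mutate its
--     # arguments (A empties restes and removes matched boites in place).
--     bs = sorted(boites, reverse=True)
--     j = 0
--     for r in sorted(restes, reverse=True):
--         if r > bs[j]:
--             n -= 1
--         else:
--             j += 1
--     return n
-- ===== Notes on version B (the rewrite author's own statement) =====
-- stated objective: faster
-- what changed: B sorts both lists descending once and does a single two-pointer scan instead of A's repeated max()+list.remove() passes (and B does not mutate its arguments).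
import Mathlib
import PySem

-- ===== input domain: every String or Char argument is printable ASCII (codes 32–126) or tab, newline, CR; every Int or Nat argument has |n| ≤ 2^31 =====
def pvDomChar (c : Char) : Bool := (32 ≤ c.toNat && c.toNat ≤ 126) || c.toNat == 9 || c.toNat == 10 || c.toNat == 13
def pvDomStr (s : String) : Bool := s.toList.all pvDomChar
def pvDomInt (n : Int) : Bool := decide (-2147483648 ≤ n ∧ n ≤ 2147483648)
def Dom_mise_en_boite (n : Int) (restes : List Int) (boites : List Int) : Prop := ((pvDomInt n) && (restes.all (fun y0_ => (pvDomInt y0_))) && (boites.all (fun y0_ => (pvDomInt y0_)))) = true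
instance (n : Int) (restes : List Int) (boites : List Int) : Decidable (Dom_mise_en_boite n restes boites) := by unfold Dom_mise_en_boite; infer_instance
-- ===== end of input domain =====

-- B replaces A's repeated max()+remove() passes by one descending sort of each list and a
-- single two-pointer scan (asymptotically faster); equivalence is about the RETURN value only:
-- A empties `restes` and removes matched `boites` in place, B does not mutate its arguments.

-- ===== PORT A =====
-- while restes: r = max(restes); b = max(boites); if r > b: n -= 1 else: boites.remove(b); restes.remove(r)
-- (max(boites) on an empty list raises ValueError in Python; that input is outside Pre_, the port returns n there)
def mbLoopA (n : Int) (restes : List Int) (boites : List Int) : Int :=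
  match restes with
  | [] => n
  | x :: t =>
    match hr : PySem.List.max? (x :: t) (fun y => y) with
    | none => n   -- unreachable: the list is nonempty
    | some r =>
      match PySem.List.max? boites (fun y => y) with
      | none => n -- Python raises ValueError here (outside Pre_)
      | some b =>
        match hrem : PySem.List.remove? (x :: t) r with
        | none => n -- unreachable: r ∈ x :: t
        | some rest =>
          if r > b then mbLoopA (n - 1) rest boites
          else mbLoopA n rest ((PySem.List.remove? boites b).getD boites)
termination_by restes.length
decreasing_by
  all_goals
    have hmem := PySem.List.max?_mem hr
    rw [PySem.List.remove?_eq_some_erase _ r hmem] at hrem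
    cases hrem
    have := List.length_erase_add_one hmem
    omega

def mise_en_boite (n : Int) (restes : List Int) (boites : List Int) : Int :=
  mbLoopA n restes boites

-- ===== PORT B =====
-- bs = sorted(boites, reverse=True); j = 0; for r in sorted(restes, reverse=True): if r > bs[j]: n -= 1 else: j += 1
-- (bs[j] raises IndexError in Python when j is past the end; outside Pre_, the port returns n there)
def mbLoopB (bs : List Int) (n : Int) (j : Int) (rs : List Int) : Int :=
  match rs with
  | [] => n
  | r :: rest =>
    match PySem.List.pyGet? bs j with
    | none => n -- Python raises IndexError here (outside Pre_)
    | some b =>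
      if r > b then mbLoopB bs (n - 1) j rest
      else mbLoopB bs n (j + 1) rest

def mise_en_boite_alt (n : Int) (restes : List Int) (boites : List Int) : Int :=
  mbLoopB (PySem.List.sorted boites (fun x => x) true) n 0
    (PySem.List.sorted restes (fun x => x) true)

-- ===== PRECONDITION & SPEC =====
-- Pre_ excludes exactly the inputs on which Python A raises ValueError (all boites consumed while
-- restes remain): by Hall's condition on the ascending boites, A raises iff restes is nonempty,
-- strictly longer than boites, and every boite prefix finds enough small restes among all but the
-- smallest reste; Pre_ is the negation of that.
def Pre_mise_en_boite (n : Int) (restes : List Int) (boites : List Int) : Prop :=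
  restes = [] ∨ restes.length ≤ boites.length ∨
    ((List.range boites.length).any (fun j =>
      decide ((PySem.List.sorted restes (fun x => x) false).tail.countP
        (fun r => decide (r ≤ (PySem.List.sorted boites (fun x => x) false).getD j 0)) < j + 1))) = true
instance (n : Int) (restes : List Int) (boites : List Int) : Decidable (Pre_mise_en_boite n restes boites) := by unfold Pre_mise_en_boite; infer_instance

def pvWitness_mise_en_boite : Int × List Int × List Int := (2, [1, 3], [2, 3])

def Spec_mise_en_boite (n : Int) (restes : List Int) (boites : List Int) (out : Int) : Prop := out = mise_en_boite_alt n restes boites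
instance (n : Int) (restes : List Int) (boites : List Int) (out : Int) : Decidable (Spec_mise_en_boite n restes boites out) := by unfold Spec_mise_en_boite; infer_instance

-- ===== CLAIM (what is proved, stated in full; the proofs are below) =====
def Claim_equal_mise_en_boite : Prop := ∀ (n : Int) (restes : List Int) (boites : List Int), Dom_mise_en_boite n restes boites → Pre_mise_en_boite n restes boites → Spec_mise_en_boite n restes boites (mise_en_boite n restes boites)

-- ===== LEMMAS AND PROOFS =====

-- helper used only by the proofs: B's loop with the already-consumed prefix dropped
def mbLoopC (n : Int) (rs : List Int) (bs : List Int) : Int :=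
  match rs with
  | [] => n
  | r :: rest =>
    match bs with
    | [] => n
    | b :: bt => if r > b then mbLoopC (n - 1) rest (b :: bt) else mbLoopC n rest bt

-- any ≥-pairwise rearrangement of xs is sorted(xs, reverse=True)
theorem sortedDesc_eq_of_perm (xs ys : List Int) (hp : ys.Perm xs)
    (hs : ys.Pairwise (fun a b => b ≤ a)) :
    PySem.List.sorted xs (fun x => x) true = ys :=
  List.Perm.eq_of_pairwise' (PySem.List.sorted_pairwise_rev xs (fun x => x)) hs
    ((PySem.List.sorted_perm xs (fun x => x) true).trans hp.symm)

-- popping the maximum: sorted(xs, reverse=True) = max :: sorted(xs.erase max, reverse=True)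
theorem sortedDesc_cons_max (xs : List Int) (m : Int)
    (hm : PySem.List.max? xs (fun y => y) = some m) :
    PySem.List.sorted xs (fun x => x) true
      = m :: PySem.List.sorted (xs.erase m) (fun x => x) true := by
  have hmem : m ∈ xs := PySem.List.max?_mem hm
  have hmax : ∀ y ∈ xs, y ≤ m := fun y hy => PySem.List.max?_isMax hm y hy
  refine sortedDesc_eq_of_perm xs _ ?_ ?_
  · exact ((PySem.List.sorted_perm (xs.erase m) (fun x => x) true).cons m).trans
      (List.perm_cons_erase hmem).symm
  · refine List.pairwise_cons.mpr ⟨?_, PySem.List.sorted_pairwise_rev _ _⟩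
    intro y hy
    exact hmax y (List.mem_of_mem_erase ((PySem.List.mem_sorted _ _ _ _).1 hy))

-- A's loop equals the helper loop on the two sorted lists
theorem loopA_eq_loopC (k : Nat) : ∀ (restes : List Int), restes.length ≤ k →
    ∀ (boites : List Int) (n : Int),
    mbLoopA n restes boites
      = mbLoopC n (PySem.List.sorted restes (fun x => x) true)
                  (PySem.List.sorted boites (fun x => x) true) := by
  induction k with
  | zero =>
    intro restes hk boites n
    have : restes = [] := by cases restes <;> simp_all
    subst this
    rw [(PySem.List.sorted_eq_nil_iff ([] : List Int) (fun x => x) true).mpr rfl, mbLoopA]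
    rfl
  | succ k ih =>
    intro restes hk boites n
    cases restes with
    | nil =>
      rw [(PySem.List.sorted_eq_nil_iff ([] : List Int) (fun x => x) true).mpr rfl, mbLoopA]
      rfl
    | cons x t =>
      obtain ⟨r, hr⟩ : ∃ r, PySem.List.max? (x :: t) (fun y => y) = some r := by
        cases h : PySem.List.max? (x :: t) (fun y => y) with
        | none => simp [PySem.List.max?_eq_none_iff] at h
        | some r => exact ⟨r, rfl⟩
      have hrmem : r ∈ x :: t := PySem.List.max?_mem hr
      have hrem : PySem.List.remove? (x :: t) r = some ((x :: t).erase r) :=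
        PySem.List.remove?_eq_some_erase _ r hrmem
      have hlen : ((x :: t).erase r).length ≤ k := by
        have h2 := List.length_erase_add_one hrmem
        omega
      rw [mbLoopA]
      rw [sortedDesc_cons_max (x :: t) r hr]
      split
      next h => rw [hr] at h; simp at h
      next r' h =>
      have hr2 : r = r' := by rw [hr] at h; exact Option.some.inj h
      subst hr2
      split
      next h2 =>
        have hb : boites = [] := (PySem.List.max?_eq_none_iff _ _).mp h2
        subst hb
        rw [(PySem.List.sorted_eq_nil_iff ([] : List Int) (fun x => x) true).mpr rfl]
        rfl
      next b h2 =>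
        rw [sortedDesc_cons_max boites b h2]
        split
        next h3 => rw [hrem] at h3; simp at h3
        next rest h3 =>
        have hrest : rest = (x :: t).erase r := by
          rw [hrem] at h3; exact (Option.some.inj h3).symm
        subst hrest
        rw [mbLoopC]
        by_cases hcmp : r > b
        · rw [if_pos hcmp, if_pos hcmp, ← sortedDesc_cons_max boites b h2]
          exact ih _ hlen boites (n - 1)
        · rw [if_neg hcmp, if_neg hcmp]
          have hremb := PySem.List.remove?_eq_some_erase boites b (PySem.List.max?_mem h2)
          rw [hremb, Option.getD_some]
          exact ih _ hlen (boites.erase b) n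

-- B's indexed loop equals the helper loop with the consumed prefix dropped
theorem loopB_eq_loopC (rs : List Int) : ∀ (bs : List Int) (j : Int) (n : Int), 0 ≤ j →
    mbLoopB bs n j rs = mbLoopC n rs (bs.drop j.toNat) := by
  induction rs with
  | nil => intro bs j n hj; rfl
  | cons r rest ih =>
    intro bs j n hj
    cases hget : bs[j.toNat]? with
    | none =>
      have hle : bs.length ≤ j.toNat := by
        by_contra h
        rw [List.getElem?_eq_getElem (by omega)] at hget
        simp at hget
      simp only [mbLoopB, PySem.List.pyGet?_of_nonneg bs hj, hget]
      rw [List.drop_eq_nil_of_le hle]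
      rfl
    | some b =>
      have hlt : j.toNat < bs.length := by
        by_contra h
        rw [List.getElem?_eq_none_iff.mpr (by omega)] at hget
        simp at hget
      have hbv : bs[j.toNat] = b := by
        rw [List.getElem?_eq_getElem hlt] at hget
        exact Option.some.inj hget
      have hdrop : bs.drop j.toNat = b :: bs.drop (j.toNat + 1) := by
        rw [List.drop_eq_getElem_cons hlt, hbv]
      simp only [mbLoopB, PySem.List.pyGet?_of_nonneg bs hj, hget]
      rw [hdrop, mbLoopC]
      by_cases hcmp : r > b
      · rw [if_pos hcmp, if_pos hcmp, ih bs j (n - 1) hj, hdrop]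
      · rw [if_neg hcmp, if_neg hcmp, ih bs (j + 1) n (by omega)]
        have : (j + 1).toNat = j.toNat + 1 := by omega
        rw [this]

theorem ports_agree (n : Int) (restes boites : List Int) :
    mise_en_boite n restes boites = mise_en_boite_alt n restes boites := by
  rw [mise_en_boite, mise_en_boite_alt, loopA_eq_loopC restes.length restes le_rfl,
    loopB_eq_loopC _ _ 0 n le_rfl]
  rfl

-- ===== VERDICT (by name: the statement is the Claim_ definition above) =====
theorem mise_en_boite_spec : Claim_equal_mise_en_boite := by
  intro n restes boites _ _
  unfold Spec_mise_en_boite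
  exact ports_agree n restes boites
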